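-- pv_equiv track=rewrite | github.com/nrmlcitizen06/CapitalSheetsCollector | CapitalSheetsApp/Power/scripts/CapitalSheets_Functions.py | FoundData
-- ===== SOURCE A (Python) =====
-- def FoundData(results):
--     #Take list of results after prediction and seperate into corresponding lists and return the 3 main lists
--     counter = -1
--     bs_list = []
--     inc_list = []
--     cf_list = []
--
--     for _ in results:
--         counter += 1
--         if _ == "Balance_Sheet":
--             bs_list.append(counter)
--
--         elif _ == "Income_Sheet":
--             inc_list.append(counter)
--
--         elif _ == "Cashflow_Sheet":
--             cf_list.append(counter)
--
--     return bs_list, inc_list, cf_list  # Modified to return lists directly for easier use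
-- ===== SOURCE B (Python) =====
-- def FoundData(results):
--     # Three independent comprehension scans (one per label) instead of one counter-driven dispatch loop.
--     bs_list = [i for i, x in enumerate(results) if x == "Balance_Sheet"]
--     inc_list = [i for i, x in enumerate(results) if x == "Income_Sheet"]
--     cf_list = [i for i, x in enumerate(results) if x == "Cashflow_Sheet"]
--     return bs_list, inc_list, cf_list
-- ===== Notes on version B (the rewrite author's own statement) =====
-- stated objective: idiomatic
-- what changed: Replaces the single counter-driven dispatch loop with three independent enumerate-based list comprehensions, one per label.
import Mathlib
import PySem

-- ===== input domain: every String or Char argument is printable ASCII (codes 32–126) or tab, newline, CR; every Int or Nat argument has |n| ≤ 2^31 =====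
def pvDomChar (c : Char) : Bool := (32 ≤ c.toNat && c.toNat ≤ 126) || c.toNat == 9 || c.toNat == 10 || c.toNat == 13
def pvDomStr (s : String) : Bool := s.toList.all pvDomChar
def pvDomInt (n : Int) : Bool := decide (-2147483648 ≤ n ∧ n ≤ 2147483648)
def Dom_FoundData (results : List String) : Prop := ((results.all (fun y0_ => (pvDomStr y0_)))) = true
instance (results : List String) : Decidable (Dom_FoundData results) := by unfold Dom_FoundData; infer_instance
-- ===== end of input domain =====

-- B replaces A's single counter-driven dispatch loop with three independent enumerate-filter scans (idiomatic decomposition).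


-- ===== PORT A =====
-- one pass: counter starts at -1, is incremented for each element, then the element is dispatched by label
def FoundData (results : List String) : List Int × List Int × List Int :=
  let s := results.foldl
    (fun (st : Int × List Int × List Int × List Int) x =>
      let c := st.1 + 1
      if x = "Balance_Sheet" then (c, st.2.1 ++ [c], st.2.2.1, st.2.2.2)
      else if x = "Income_Sheet" then (c, st.2.1, st.2.2.1 ++ [c], st.2.2.2)
      else if x = "Cashflow_Sheet" then (c, st.2.1, st.2.2.1, st.2.2.2 ++ [c])
      else (c, st.2.1, st.2.2.1, st.2.2.2))
    (-1, [], [], [])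
  (s.2.1, s.2.2.1, s.2.2.2)

-- ===== PORT B =====
-- one comprehension scan per label: [i for i, x in enumerate(results) if x == lbl]
def pvSel (lbl : String) (l : List (Int × String)) : List Int :=
  (l.filter (fun p => p.2 == lbl)).map (·.1)

def FoundData_alt (results : List String) : List Int × List Int × List Int :=
  let e := PySem.List.enumerate results
  (pvSel "Balance_Sheet" e, pvSel "Income_Sheet" e, pvSel "Cashflow_Sheet" e)

-- ===== PRECONDITION & SPEC =====
def Spec_FoundData (results : List String) (out : List Int × List Int × List Int) : Prop := out = FoundData_alt results
instance (results : List String) (out : List Int × List Int × List Int) : Decidable (Spec_FoundData results out) := by unfold Spec_FoundData; infer_instance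

-- ===== CLAIM (what is proved, stated in full; the proofs are below) =====
def Claim_equal_FoundData : Prop := ∀ (results : List String), Dom_FoundData results → Spec_FoundData results (FoundData results)

-- ===== LEMMAS AND PROOFS =====
theorem FoundData_loop (results : List String) (c : Int) (bs inc cf : List Int) :
    results.foldl
      (fun (st : Int × List Int × List Int × List Int) x =>
        let c := st.1 + 1
        if x = "Balance_Sheet" then (c, st.2.1 ++ [c], st.2.2.1, st.2.2.2)
        else if x = "Income_Sheet" then (c, st.2.1, st.2.2.1 ++ [c], st.2.2.2)
        else if x = "Cashflow_Sheet" then (c, st.2.1, st.2.2.1, st.2.2.2 ++ [c])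
        else (c, st.2.1, st.2.2.1, st.2.2.2))
      (c, bs, inc, cf)
    = (c + results.length,
       bs ++ pvSel "Balance_Sheet" (PySem.List.enumerate results (c + 1)),
       inc ++ pvSel "Income_Sheet" (PySem.List.enumerate results (c + 1)),
       cf ++ pvSel "Cashflow_Sheet" (PySem.List.enumerate results (c + 1))) := by
  induction results generalizing c bs inc cf with
  | nil => simp [pvSel, PySem.List.enumerate]
  | cons x xs ih =>
    simp only [List.foldl_cons, PySem.List.enumerate_cons, pvSel, List.filter_cons, List.length_cons]
    by_cases h1 : x = "Balance_Sheet"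
    · simp [h1, ih, pvSel]; omega
    · by_cases h2 : x = "Income_Sheet"
      · simp [h2, ih, pvSel]; omega
      · by_cases h3 : x = "Cashflow_Sheet"
        · simp [h3, ih, pvSel]; omega
        · simp [h1, h2, h3, ih, pvSel]; omega

-- ===== VERDICT (by name: the statement is the Claim_ definition above) =====
theorem FoundData_spec : Claim_equal_FoundData := by
  intro results _
  show FoundData results = FoundData_alt results
  simp [FoundData, FoundData_alt, FoundData_loop]
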